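-- pv_equiv track=rewrite | github.com/claudiosa/CCS | minizinc/fences.py | solve
-- ===== SOURCE A (Python) =====
-- from collections import deque
--
-- def solve(lados, disponiveis):
--     lados  = sorted(lados)
--     disponiveis = deque(sorted(disponiveis))
--     usadas = []
--
--     for lado in lados:
--         while disponiveis:
--             comprimento = disponiveis.popleft()
--
--             if comprimento > lado:
--                 usadas.append(comprimento)
--                 break
--
--         if not disponiveis: break
--
--     return list(zip(lados, usadas)), sum(usadas)
-- ===== SOURCE B (Python) =====
-- def _bisect_right(a, x, lo, hi):
--     while lo < hi:
--         mid = (lo + hi) // 2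
--         if x < a[mid]:
--             hi = mid
--         else:
--             lo = mid + 1
--     return lo
--
-- def solve(lados, disponiveis):
--     lados = sorted(lados)
--     disponiveis = sorted(disponiveis)
--     n = len(disponiveis)
--     usadas = []
--     i = 0
--     for lado in lados:
--         i = _bisect_right(disponiveis, lado, i, n)
--         if i < n:
--             usadas.append(disponiveis[i])
--             i += 1
--         else:
--             break
--     return list(zip(lados, usadas)), sum(usadas)
-- ===== Notes on version B (the rewrite author's own statement) =====
-- stated objective: alternative
-- what changed: A pops sorted fences one by one from a deque, scanning linearly for the first fence longer than each side; B keeps an integer pointer into the sorted fence list and advances it with a hand-written bisect_right binary search, never consuming or copying the list.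
import Mathlib
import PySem

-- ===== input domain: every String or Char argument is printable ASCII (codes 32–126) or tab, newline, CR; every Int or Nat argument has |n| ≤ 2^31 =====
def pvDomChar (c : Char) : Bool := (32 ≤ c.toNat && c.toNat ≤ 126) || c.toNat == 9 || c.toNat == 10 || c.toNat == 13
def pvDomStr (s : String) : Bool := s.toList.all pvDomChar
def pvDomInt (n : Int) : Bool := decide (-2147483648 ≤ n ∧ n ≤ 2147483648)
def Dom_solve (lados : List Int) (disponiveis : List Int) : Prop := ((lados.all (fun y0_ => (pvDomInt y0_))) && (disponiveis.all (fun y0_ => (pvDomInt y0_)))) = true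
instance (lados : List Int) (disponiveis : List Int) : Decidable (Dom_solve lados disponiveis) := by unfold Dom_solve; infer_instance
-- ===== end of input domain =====

-- B replaces A's destructive deque popleft scan by a binary-search pointer into the sorted list (alternative algorithm, same result).

-- ===== PORT A =====
-- the inner 'while disponiveis: comprimento = disponiveis.popleft(); if comprimento > lado: usadas.append(comprimento); break'
def solveWhile (lado : Int) : List Int → List Int → List Int × List Int
  | [], usadas => ([], usadas)
  | c :: rest, usadas => if lado < c then (rest, usadas ++ [c]) else solveWhile lado rest usadas

-- the outer 'for lado in lados: …; if not disponiveis: break'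
def solveLoop : List Int → List Int → List Int → List Int
  | [], _, usadas => usadas
  | lado :: rest, disp, usadas =>
    let p := solveWhile lado disp usadas
    if p.1.isEmpty then p.2 else solveLoop rest p.1 p.2

def solve (lados : List Int) (disponiveis : List Int) : (List (Int × Int)) × Int :=
  let ls := PySem.List.sorted lados (fun x => x)
  let ds := PySem.List.sorted disponiveis (fun x => x)
  let usadas := solveLoop ls ds []
  (ls.zip usadas, usadas.sum)

-- ===== PORT B =====
-- hand-written bisect_right (Source B's _bisect_right): while lo < hi: mid = (lo+hi)//2; …
def brAux (a : List Int) (x : Int) (lo hi : Nat) : Nat :=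
  if h : lo < hi then
    let mid := (lo + hi) / 2
    if x < a.getD mid 0 then brAux a x lo mid else brAux a x (mid + 1) hi
  else lo
termination_by hi - lo
decreasing_by all_goals omega

-- the 'for lado in lados' loop of Source B, with the pointer i
def solveAltLoop (a : List Int) : List Int → Nat → List Int → List Int
  | [], _, usadas => usadas
  | lado :: rest, i, usadas =>
    let j := brAux a lado i a.length
    if j < a.length then solveAltLoop a rest (j + 1) (usadas ++ [a.getD j 0]) else usadas

def solve_alt (lados : List Int) (disponiveis : List Int) : (List (Int × Int)) × Int :=
  let ls := PySem.List.sorted lados (fun x => x)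
  let ds := PySem.List.sorted disponiveis (fun x => x)
  let usadas := solveAltLoop ds ls 0 []
  (ls.zip usadas, usadas.sum)

-- ===== PRECONDITION & SPEC =====
def Spec_solve (lados : List Int) (disponiveis : List Int) (out : (List (Int × Int)) × Int) : Prop := out = solve_alt lados disponiveis
instance (lados : List Int) (disponiveis : List Int) (out : (List (Int × Int)) × Int) : Decidable (Spec_solve lados disponiveis out) := by unfold Spec_solve; infer_instance

-- ===== CLAIM (what is proved, stated in full; the proofs are below) =====
def Claim_equal_solve : Prop := ∀ (lados : List Int) (disponiveis : List Int), Dom_solve lados disponiveis → Spec_solve lados disponiveis (solve lados disponiveis)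

-- ===== LEMMAS AND PROOFS =====

-- brAux on a sorted list finds the first index ≥ lo whose element exceeds x (cut off at hi)
lemma brAux_spec (a : List Int) (x : Int) :
    ∀ lo hi, lo ≤ hi → hi ≤ a.length → a.Pairwise (· ≤ ·) →
      lo ≤ brAux a x lo hi ∧ brAux a x lo hi ≤ hi ∧
      (∀ k, lo ≤ k → k < brAux a x lo hi → a.getD k 0 ≤ x) ∧
      (brAux a x lo hi < hi → x < a.getD (brAux a x lo hi) 0) := by
  intro lo hi
  induction lo, hi using brAux.induct a x with
  | case1 lo hi h mid hlt ih =>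
    intro _ hhi hs
    rw [brAux, dif_pos h, if_pos (show x < a.getD ((lo + hi) / 2) 0 from hlt)]
    have hmid : mid = (lo + hi) / 2 := rfl
    rw [← hmid]
    obtain ⟨h1, h2, h3, h4⟩ := ih (by omega) (by omega) hs
    refine ⟨h1, by omega, h3, fun hj => ?_⟩
    rcases lt_or_eq_of_le h2 with hc | hc
    · exact h4 hc
    · rw [hc]; exact hlt
  | case2 lo hi h mid hge ih =>
    intro _ hhi hs
    rw [brAux, dif_pos h, if_neg (show ¬ x < a.getD ((lo + hi) / 2) 0 from hge)]
    have hmid : mid = (lo + hi) / 2 := rfl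
    rw [← hmid]
    obtain ⟨h1, h2, h3, h4⟩ := ih (by omega) hhi hs
    refine ⟨by omega, h2, fun k hk1 hk2 => ?_, h4⟩
    by_cases hkm : mid + 1 ≤ k
    · exact h3 k hkm hk2
    · -- k ≤ mid: a[k] ≤ a[mid] ≤ x by sortedness
      have hmlen : mid < a.length := by omega
      have hklen : k < a.length := by omega
      have hle : a.getD k 0 ≤ a.getD mid 0 := by
        rcases lt_or_eq_of_le (by omega : k ≤ mid) with hlt' | heq
        · have := List.pairwise_iff_getElem.mp hs k mid hklen hmlen hlt'
          simpa [List.getD_eq_getElem?_getD, List.getElem?_eq_getElem, hklen, hmlen] using this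
        · rw [heq]
      exact le_trans hle (not_lt.mp hge)
  | case3 lo hi h =>
    intro hlo _ _
    rw [brAux, dif_neg h]
    exact ⟨le_refl _, hlo, fun k hk1 hk2 => absurd (lt_of_le_of_lt hk1 hk2) (lt_irrefl _), fun hc => absurd hc h⟩

-- A's inner while over the suffix a.drop i, characterised by any j with the bisect properties
lemma solveWhile_drop (a : List Int) (x : Int) :
    ∀ i u j, i ≤ j → j ≤ a.length →
      (∀ k, i ≤ k → k < j → a.getD k 0 ≤ x) →
      (j < a.length → x < a.getD j 0) →
      solveWhile x (a.drop i) u =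
        if j < a.length then (a.drop (j + 1), u ++ [a.getD j 0]) else ([], u) := by
  intro i
  induction hn : a.length - i using Nat.strong_induction_on generalizing i with
  | _ n ih =>
  intro u j hij hj h1 h2
  by_cases hi : i < a.length
  · have hcons : a.drop i = a[i] :: a.drop (i + 1) := List.drop_eq_getElem_cons hi
    rw [hcons, solveWhile]
    by_cases hx : x < a[i]
    · have hji : j = i := by
        by_contra hne
        have : a.getD i 0 ≤ x := h1 i (le_refl _) (by omega)
        rw [List.getD_eq_getElem?_getD, List.getElem?_eq_getElem hi] at this
        simp at this; omega
      subst hji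
      have : a.getD j 0 = a[j] := by
        rw [List.getD_eq_getElem?_getD, List.getElem?_eq_getElem hi]; rfl
      simp [hx, hi]
    · have hji : i < j := by
        rcases lt_or_eq_of_le hij with h' | h'
        · exact h'
        · exfalso; subst h'; exact hx (h2 (by omega) |>.trans_le (by
            rw [List.getD_eq_getElem?_getD, List.getElem?_eq_getElem hi]; simp))
      simp only [hx]
      exact ih (a.length - (i + 1)) (by omega) (i + 1) rfl u j hji hj
        (fun k hk1 hk2 => h1 k (by omega) hk2) h2
  · have hdrop : a.drop i = [] := List.drop_eq_nil_of_le (by omega)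
    have hji : j = a.length := by omega
    rw [hdrop, solveWhile]
    simp [hji]

-- B with its pointer at the end of the list stops immediately, whatever lados remain
lemma altLoop_end (a : List Int) (lados u : List Int) :
    solveAltLoop a lados a.length u = u := by
  cases lados with
  | nil => rfl
  | cons l r =>
    rw [solveAltLoop]
    have hb : brAux a l a.length a.length = a.length := by
      rw [brAux, dif_neg (lt_irrefl _)]
    simp [hb]

-- the outer loops agree: A consumes the queue a.drop i while B advances the pointer i
lemma loop_agree (a : List Int) (hs : a.Pairwise (· ≤ ·)) :
    ∀ lados i u, i ≤ a.length → solveLoop lados (a.drop i) u = solveAltLoop a lados i u := by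
  intro lados
  induction lados with
  | nil => intro i u _; rfl
  | cons lado rest ih =>
    intro i u hi
    obtain ⟨h1, h2, h3, h4⟩ := brAux_spec a lado i a.length hi (le_refl _) hs
    rw [solveLoop, solveAltLoop,
      solveWhile_drop a lado i u (brAux a lado i a.length) h1 h2 h3 h4]
    set j := brAux a lado i a.length with hj
    by_cases hjl : j < a.length
    · rw [if_pos hjl, if_pos hjl]
      by_cases hend : a.length ≤ j + 1
      · have hd : List.drop (j + 1) a = [] := List.drop_eq_nil_of_le hend
        have hj1 : j + 1 = a.length := by omega
        rw [hd]
        simp only [List.isEmpty_nil, if_pos, hj1, altLoop_end]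
      · have hd : (List.drop (j + 1) a).isEmpty = false := by
          simp [List.drop_eq_nil_iff]; omega
        simp only [hd, Bool.false_eq_true, if_neg, not_false_iff]
        exact ih (j + 1) (u ++ [a.getD j 0]) (by omega)
    · rw [if_neg hjl, if_neg hjl]
      simp

lemma solveLoop_eq_alt (a : List Int) (hs : a.Pairwise (· ≤ ·)) (lados u : List Int) :
    solveLoop lados a u = solveAltLoop a lados 0 u := by
  simpa using loop_agree a hs lados 0 u (Nat.zero_le _)

-- ===== VERDICT (by name: the statement is the Claim_ definition above) =====
theorem solve_spec : Claim_equal_solve := by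
  intro lados disponiveis _
  unfold Spec_solve
  simp only [solve, solve_alt]
  rw [solveLoop_eq_alt _ (PySem.List.sorted_pairwise disponiveis (fun x => x))]
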